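-- pv_equiv track=rewrite | github.com/bre-cho/veo | backend/app/services/publish_providers/platform_recovery_workflow.py | _classify_code
-- ===== SOURCE A (Python) =====
-- _YOUTUBE_ERROR_CODES: dict[str, str] = {
--     "401": "auth_expired",
--     "403": "quota_exceeded",
--     "400": "content_rejected",
--     "429": "rate_limited",
--     "5": "network_error",  # 5xx prefix
-- }
--
-- _TIKTOK_ERROR_CODES: dict[str, str] = {
--     "10002": "auth_expired",
--     "10003": "auth_expired",
--     "10005": "content_policy",
--     "10006": "rate_limited",
--     "5": "network_error",
-- }
--
-- _META_ERROR_CODES: dict[str, str] = {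
--     "190": "token_expired",
--     "200": "policy_violation",
--     "275": "policy_violation",
--     "368": "account_restricted",
--     "613": "rate_limited",
--     "5": "network_error",
-- }
--
-- def _classify_code(raw_code: str, platform: str) -> str | None:
--     """Map a raw error code string to a structured error type."""
--     plat = platform.lower()
--     code_map = (
--         _YOUTUBE_ERROR_CODES if plat in ("youtube", "shorts")
--         else _TIKTOK_ERROR_CODES if plat == "tiktok"
--         else _META_ERROR_CODES if plat in ("meta", "reels", "instagram", "facebook")
--         else {}
--     )
--     # Exact match
--     if raw_code in code_map:
--         return code_map[raw_code]
--     # Prefix match (e.g. "5xx" network errors)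
--     for prefix, etype in code_map.items():
--         if raw_code.startswith(prefix):
--             return etype
--     return None
-- ===== SOURCE B (Python) =====
-- _YOUTUBE_ERROR_CODES: dict[str, str] = {
--     "401": "auth_expired",
--     "403": "quota_exceeded",
--     "400": "content_rejected",
--     "429": "rate_limited",
--     "5": "network_error",  # 5xx prefix
-- }
--
-- _TIKTOK_ERROR_CODES: dict[str, str] = {
--     "10002": "auth_expired",
--     "10003": "auth_expired",
--     "10005": "content_policy",
--     "10006": "rate_limited",
--     "5": "network_error",
-- }
--
-- _META_ERROR_CODES: dict[str, str] = {
--     "190": "token_expired",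
--     "200": "policy_violation",
--     "275": "policy_violation",
--     "368": "account_restricted",
--     "613": "rate_limited",
--     "5": "network_error",
-- }
--
--
-- def _classify_code(raw_code: str, platform: str) -> str | None:
--     """Map a raw error code string to a structured error type."""
--     plat = platform.lower()
--     code_map = (
--         _YOUTUBE_ERROR_CODES if plat in ("youtube", "shorts")
--         else _TIKTOK_ERROR_CODES if plat == "tiktok"
--         else _META_ERROR_CODES if plat in ("meta", "reels", "instagram", "facebook")
--         else {}
--     )
--     # Longest-prefix match over the input: one pass of O(1) dict lookups,
--     # bounded by the longest key. (Exact match is the longest prefix; no key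
--     # in these maps is a proper prefix of another, so at most one prefix hits.)
--     limit = min(len(raw_code), max(map(len, code_map), default=0))
--     for i in range(limit, 0, -1):
--         p = raw_code[:i]
--         if p in code_map:
--             return code_map[p]
--     return None
-- ===== Notes on version B (the rewrite author's own statement) =====
-- stated objective: alternative
-- what changed: Replaces A's exact-match lookup followed by a scan over the dict's entries with startswith by a single longest-prefix-match loop over the input: for i from min(len(raw_code), longest key) down to 1 it tests raw_code[:i] with one O(1) dict lookup; valid because no key in these maps is a proper prefix of another.
import Mathlib
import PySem

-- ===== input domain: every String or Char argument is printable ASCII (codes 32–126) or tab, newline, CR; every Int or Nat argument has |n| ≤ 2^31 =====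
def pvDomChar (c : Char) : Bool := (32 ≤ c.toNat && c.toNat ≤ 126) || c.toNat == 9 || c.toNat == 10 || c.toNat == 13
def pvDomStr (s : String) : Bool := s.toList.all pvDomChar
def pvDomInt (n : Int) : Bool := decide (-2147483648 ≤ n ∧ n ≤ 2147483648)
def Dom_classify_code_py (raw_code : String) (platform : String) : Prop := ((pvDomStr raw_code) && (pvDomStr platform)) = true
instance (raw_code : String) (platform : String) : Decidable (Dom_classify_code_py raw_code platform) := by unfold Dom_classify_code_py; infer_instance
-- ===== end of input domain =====

-- B replaces A's exact-match-then-scan-over-dict-entries by a single longest-prefix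
-- loop over the input's own prefixes with one dict lookup each (objective: alternative).

-- ===== PORT A =====
def pvYT : PySem.Dict String String :=
  ⟨[("401", "auth_expired"), ("403", "quota_exceeded"), ("400", "content_rejected"),
    ("429", "rate_limited"), ("5", "network_error")]⟩

def pvTT : PySem.Dict String String :=
  ⟨[("10002", "auth_expired"), ("10003", "auth_expired"), ("10005", "content_policy"),
    ("10006", "rate_limited"), ("5", "network_error")]⟩

def pvMETA : PySem.Dict String String :=
  ⟨[("190", "token_expired"), ("200", "policy_violation"), ("275", "policy_violation"),
    ("368", "account_restricted"), ("613", "rate_limited"), ("5", "network_error")]⟩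

-- A's `for prefix, etype in code_map.items(): if raw_code.startswith(prefix): return etype`
def pvPrefixLoop (raw_code : String) : List (String × String) → Option String
  | [] => none
  | (pfx, etype) :: rest =>
    if PySem.Str.startswith raw_code pfx then some etype else pvPrefixLoop raw_code rest

def classify_code_py (raw_code : String) (platform : String) : Option String :=
  let plat := PySem.Str.lower platform
  let code_map :=
    if plat = "youtube" ∨ plat = "shorts" then pvYT
    else if plat = "tiktok" then pvTT
    else if plat = "meta" ∨ plat = "reels" ∨ plat = "instagram" ∨ plat = "facebook" then pvMETA
    else PySem.Dict.empty
  match code_map.get? raw_code with        -- `if raw_code in code_map: return code_map[raw_code]`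
  | some v => some v
  | none => pvPrefixLoop raw_code code_map.items

-- ===== PORT B =====
-- `for i in range(len(raw_code), 0, -1): p = raw_code[:i]; if p in code_map: return code_map[p]`
def pvAltLoop (raw_code : String) (code_map : PySem.Dict String String) : Nat → Option String
  | 0 => none
  | n + 1 =>
    let p := PySem.Str.slice raw_code none (some ((n + 1 : Nat) : Int))
    match code_map.get? p with
    | some v => some v
    | none => pvAltLoop raw_code code_map n

def classify_code_py_alt (raw_code : String) (platform : String) : Option String :=
  let plat := PySem.Str.lower platform
  let code_map :=
    if plat = "youtube" ∨ plat = "shorts" then pvYT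
    else if plat = "tiktok" then pvTT
    else if plat = "meta" ∨ plat = "reels" ∨ plat = "instagram" ∨ plat = "facebook" then pvMETA
    else PySem.Dict.empty
  let limit := min (PySem.Str.len raw_code) (PySem.List.maxD (code_map.keys.map PySem.Str.len) id 0)
  pvAltLoop raw_code code_map limit.toNat

-- ===== PRECONDITION & SPEC =====
def Spec_classify_code_py (raw_code : String) (platform : String) (out : Option String) : Prop := out = classify_code_py_alt raw_code platform
instance (raw_code : String) (platform : String) (out : Option String) : Decidable (Spec_classify_code_py raw_code platform out) := by unfold Spec_classify_code_py; infer_instance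

-- ===== CLAIM (what is proved, stated in full; the proofs are below) =====
def Claim_equal_classify_code_py : Prop := ∀ (raw_code : String) (platform : String), Dom_classify_code_py raw_code platform → Spec_classify_code_py raw_code platform (classify_code_py raw_code platform)

-- ===== LEMMAS AND PROOFS =====

-- The properties of the fixed code maps the equivalence rests on:
-- no key is a (weak) prefix of another entry's key, keys are distinct and nonempty.
def pvGood (kvs : List (String × String)) : Prop :=
  (∀ p ∈ kvs, ∀ q ∈ kvs, p.1.toList <+: q.1.toList → p = q) ∧
  (∀ p ∈ kvs, p.1.toList ≠ []) ∧
  (kvs.map (·.1)).Nodup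

-- If (x, v) is an entry whose key is a prefix of raw_code, A's scan returns v.
theorem pvPrefixLoop_eq_some (raw_code : String) (kvs : List (String × String))
    (hg : ∀ p ∈ kvs, ∀ q ∈ kvs, p.1.toList <+: q.1.toList → p = q)
    (x : String) (v : String) (hmem : (x, v) ∈ kvs) (hpre : x.toList <+: raw_code.toList) :
    pvPrefixLoop raw_code kvs = some v := by
  induction kvs with
  | nil => simp at hmem
  | cons hd tl ih =>
    obtain ⟨k, e⟩ := hd
    simp only [pvPrefixLoop]
    by_cases hs : PySem.Str.startswith raw_code k = true
    · rw [if_pos hs]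
      have hk : k.toList <+: raw_code.toList := by simpa [pysem] using hs
      have hkmem : ((k, e) : String × String) ∈ (k, e) :: tl := List.mem_cons_self ..
      rcases List.prefix_or_prefix_of_prefix hk hpre with h | h
      · have := hg (k, e) hkmem (x, v) hmem h
        simpa using congrArg (some ·.2) this
      · have := hg (x, v) hmem (k, e) hkmem h
        simpa using congrArg (some ·.2) this.symm
    · rw [if_neg hs]
      have hx : (x, v) ∈ tl := by
        rcases List.mem_cons.mp hmem with h | h
        · exfalso; apply hs
          have : x = k := (Prod.mk.injEq .. ▸ h).1
          simpa [pysem, ← this] using hpre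
        · exact h
      exact ih (fun p hp q hq => hg p (List.mem_cons_of_mem _ hp) q (List.mem_cons_of_mem _ hq)) hx

theorem pvPrefixLoop_eq_none (raw_code : String) (kvs : List (String × String))
    (h : ∀ p ∈ kvs, ¬ p.1.toList <+: raw_code.toList) :
    pvPrefixLoop raw_code kvs = none := by
  induction kvs with
  | nil => rfl
  | cons hd tl ih =>
    obtain ⟨k, e⟩ := hd
    simp only [pvPrefixLoop]
    rw [if_neg, ih (fun p hp => h p (List.mem_cons_of_mem _ hp))]
    intro hs
    exact h (k, e) (List.mem_cons_self ..) (by simpa [pysem] using hs)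

-- B's descending loop computes A's scan.
theorem pvAltLoop_eq_prefixLoop (raw_code : String) (kvs : List (String × String))
    (hg : pvGood kvs) (n : Nat) (hn : n ≤ raw_code.toList.length)
    (hb : ∀ p ∈ kvs, p.1.toList <+: raw_code.toList → p.1.toList.length ≤ n) :
    pvAltLoop raw_code ⟨kvs⟩ n = pvPrefixLoop raw_code kvs := by
  obtain ⟨hg1, hg2, hg3⟩ := hg
  induction n with
  | zero =>
    rw [pvAltLoop, Eq.comm]
    apply pvPrefixLoop_eq_none
    intro p hp hpre
    exact hg2 p hp (List.eq_nil_of_length_eq_zero (Nat.le_zero.mp (hb p hp hpre)))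
  | succ n ih =>
    rw [pvAltLoop]
    have hslice : (PySem.Str.slice raw_code none (some ((n + 1 : Nat) : Int))).toList
        = raw_code.toList.take (n + 1) := by
      have h : ∀ m : Nat, (PySem.Str.slice raw_code none (some ((m : Nat) : Int))).toList
          = raw_code.toList.take m := fun m => by simp [pysem]
      exact h (n + 1)
    generalize hps : PySem.Str.slice raw_code none (some ((n + 1 : Nat) : Int)) = ps at hslice ⊢
    cases hget : (PySem.Dict.mk kvs).get? ps with
    | some v =>
      have hmem : (ps, v) ∈ kvs := PySem.Dict.mem_items_of_get?_eq_some _ hget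
      have hpre : ps.toList <+: raw_code.toList := by
        rw [hslice]; exact List.take_prefix _ _
      exact (pvPrefixLoop_eq_some raw_code kvs hg1 _ v hmem hpre).symm
    | none =>
      have hnk : ∀ a b : String, (a, b) ∈ kvs → ¬ a = ps := by simpa [pysem] using hget
      apply ih (Nat.le_of_succ_le hn)
      intro p hp hpre
      have hle : p.1.toList.length ≤ n + 1 := hb p hp hpre
      rcases Nat.lt_or_ge p.1.toList.length (n + 1) with hlt | hge
      · exact Nat.lt_succ_iff.mp hlt
      · exfalso
        have hlen : p.1.toList.length = n + 1 := Nat.le_antisymm hle hge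
        have htake : p.1.toList = raw_code.toList.take (n + 1) := by
          rw [← hlen]; exact List.prefix_iff_eq_take.mp hpre
        have hpeq : p.1 = ps := by rw [String.ext_iff, hslice, htake]
        exact hnk p.1 p.2 (by simpa using hp) hpeq

theorem pvMain (raw_code : String) (kvs : List (String × String)) (hg : pvGood kvs) :
    (match (PySem.Dict.mk kvs).get? raw_code with
      | some v => some v
      | none => pvPrefixLoop raw_code kvs) =
    pvAltLoop raw_code ⟨kvs⟩
      (min (PySem.Str.len raw_code)
        (PySem.List.maxD ((PySem.Dict.mk kvs).keys.map PySem.Str.len) id 0)).toNat := by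
  have hlenrc : PySem.Str.len raw_code = (raw_code.toList.length : Int) := by simp [pysem]
  have hmax : ∀ p ∈ kvs, (p.1.toList.length : Int)
      ≤ PySem.List.maxD ((PySem.Dict.mk kvs).keys.map PySem.Str.len) id 0 := by
    intro p hp
    have hkey : p.1 ∈ (PySem.Dict.mk kvs).keys := List.mem_map_of_mem hp
    have hmem : PySem.Str.len p.1 ∈ (PySem.Dict.mk kvs).keys.map PySem.Str.len :=
      List.mem_map_of_mem hkey
    have hlenp : PySem.Str.len p.1 = (p.1.toList.length : Int) := by simp [pysem]
    cases hm : PySem.List.max? ((PySem.Dict.mk kvs).keys.map PySem.Str.len) id with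
    | none =>
      rw [(PySem.List.max?_eq_none_iff _ _).mp hm] at hmem
      exact absurd hmem List.not_mem_nil
    | some m =>
      have h := PySem.List.max?_isMax hm _ hmem
      simp only [id] at h
      rw [PySem.List.maxD, hm, Option.getD_some, ← hlenp]
      exact h
  have h1 := min_le_left (PySem.Str.len raw_code)
    (PySem.List.maxD ((PySem.Dict.mk kvs).keys.map PySem.Str.len) id 0)
  rw [pvAltLoop_eq_prefixLoop raw_code kvs hg _ (by rw [hlenrc] at h1; omega)
    (fun p hp hpre => by
      have h3 : (p.1.toList.length : Int)
          ≤ min (PySem.Str.len raw_code)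
            (PySem.List.maxD ((PySem.Dict.mk kvs).keys.map PySem.Str.len) id 0) :=
        le_min (by rw [hlenrc]; exact_mod_cast hpre.length_le) (hmax p hp)
      omega)]
  cases hget : (PySem.Dict.mk kvs).get? raw_code with
  | some v =>
    exact (pvPrefixLoop_eq_some raw_code kvs hg.1 raw_code v
      (PySem.Dict.mem_items_of_get?_eq_some _ hget) (List.prefix_refl _)).symm
  | none => rfl

-- ===== VERDICT (by name: the statement is the Claim_ definition above) =====
theorem classify_code_py_spec : Claim_equal_classify_code_py := by
  intro raw_code platform _
  unfold Spec_classify_code_py classify_code_py classify_code_py_alt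
  dsimp only
  split_ifs <;>
    first
      | exact pvMain raw_code _ (by unfold pvGood; refine ⟨?_, ?_, ?_⟩ <;> decide)
      | exact pvMain raw_code [] (by unfold pvGood; refine ⟨?_, ?_, ?_⟩ <;> simp)
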